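-- pv_equiv track=rewrite | github.com/Pivi14/InRow | Functions.py | win_check_list
-- ===== SOURCE A (Python) =====
-- def negative_check(raw_board_line):
--     for i in range(len(raw_board_line)):
--         for y in range(len(raw_board_line[i])):
--             if raw_board_line[i][y][0] < 0 or raw_board_line[i][y][1] < 0:
--                 raw_board_line[i][y] = []
--     return raw_board_line
--
-- def board_line_add(raw_board_line, board):
--     new_board_line = []
--     for i in range(len(raw_board_line)):
--         for y in range(len(raw_board_line[i])):
--             if [] in raw_board_line[i]:
--                 raw_board_line[i][y] = []
--     for w in range(len(raw_board_line)):
--         new_board_line.append([])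
--         for z in range(len(raw_board_line[w])):
--             if raw_board_line[w][z] != []:
--                 try:
--                     new_board_line[w].append(board[raw_board_line[w][z][0]][raw_board_line[w][z][1]])
--                 except:
--                     continue
--             else:
--                 continue
--     return new_board_line
--
-- def win_check_list(board, matrix_size, row, col):
--     index_change = [[[0, 0], [0, 1], [0, 2], [0, 3], [0, 4]],
--                     [[0, 0], [-1, 1], [-2, 2], [-3, 3], [-4, 4]],
--                     [[0, 0], [1, 1], [2, 2], [3, 3], [4, 4]],
--                     [[0, 0], [1, 0], [2, 0], [3, 0], [4, 0]]]
--     raw_board_line = [[], [], [], []]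
--     if matrix_size < 5:
--         for i in range(4):
--             for y in range(3):
--                 raw_board_line[i].append([row + index_change[i][y][0], col + index_change[i][y][1]])
--     elif matrix_size > 4 and matrix_size < 8:
--         for i in range(4):
--             for y in range(4):
--                 raw_board_line[i].append([row + index_change[i][y][0], col + index_change[i][y][1]])
--     elif matrix_size > 7:
--         for i in range(4):
--             for y in range(5):
--                 raw_board_line[i].append([row + index_change[i][y][0], col + index_change[i][y][1]])
--     board_line = board_line_add(negative_check(raw_board_line), board)
--     return board_line
-- ===== SOURCE B (Python) =====
-- def win_check_list(board, matrix_size, row, col):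
--     n = 3 if matrix_size < 5 else (4 if matrix_size < 8 else 5)
--
--     def cell(r, c):
--         if 0 <= r < len(board) and 0 <= c < len(board[r]):
--             return board[r][c]
--         return None
--
--     def walk(r, c, dr, dc, k):
--         if k == 0:
--             return []
--         v = cell(r, c)
--         head = [] if v is None else [v]
--         return head + walk(r + dr, c + dc, dr, dc, k - 1)
--
--     def line(dr, dc):
--         end_r = row + (n - 1) * dr if dr < 0 else row
--         end_c = col + (n - 1) * dc if dc < 0 else col
--         if end_r < 0 or end_c < 0:
--             return []
--         return walk(row, col, dr, dc, n)
--
--     return [line(0, 1), line(-1, 1), line(1, 1), line(1, 0)]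
-- ===== Notes on version B (the rewrite author's own statement) =====
-- stated objective: alternative
-- what changed: B discards A's precomputed 4x5 offset table and its staged mutate/wipe/reindex passes (negative_check, board_line_add) entirely: per direction it decides the wipe by a closed-form test on the minimal end coordinate (no coordinate list is built or scanned) and then recursively walks the board along the direction vector, emitting in-range cells as it goes.
import Mathlib
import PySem

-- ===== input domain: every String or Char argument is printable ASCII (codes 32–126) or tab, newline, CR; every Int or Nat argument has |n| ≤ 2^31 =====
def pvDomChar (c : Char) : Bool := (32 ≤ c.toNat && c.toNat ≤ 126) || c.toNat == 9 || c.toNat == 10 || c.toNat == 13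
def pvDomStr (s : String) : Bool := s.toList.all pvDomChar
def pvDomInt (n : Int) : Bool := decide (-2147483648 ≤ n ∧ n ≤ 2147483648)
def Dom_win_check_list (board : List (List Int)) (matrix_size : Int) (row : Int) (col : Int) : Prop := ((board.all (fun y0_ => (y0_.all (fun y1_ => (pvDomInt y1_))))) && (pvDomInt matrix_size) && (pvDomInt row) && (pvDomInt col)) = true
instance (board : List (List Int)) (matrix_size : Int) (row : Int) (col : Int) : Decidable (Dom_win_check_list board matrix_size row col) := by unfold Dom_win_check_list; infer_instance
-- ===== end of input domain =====

-- B drops A's offset table and its mutate/wipe/reindex passes: it tests negativity by a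
-- closed-form minimum coordinate per direction and recursively walks the board along each
-- direction vector, emitting in-range cells as it goes (objective: alternative decomposition).

-- ===== PORT A =====
-- A coordinate cell is the Python 2-element list [r, c], represented as Option (Int × Int):
-- `none` is the wiped cell `[]`.  (Python's `cell[0]` on `[]` would raise; those branches are
-- unreachable here and ported as identity/skip guards.)

-- helper negative_check: wipe every cell with a negative component
def negative_check (raw : List (List (Option (Int × Int)))) : List (List (Option (Int × Int))) :=
  raw.map (fun line => line.map (fun cell =>
    match cell with
    | some p => if p.1 < 0 ∨ p.2 < 0 then none else some p
    | none => none))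

-- helper board_line_add: first nested loop wipes a whole line as soon as it contains [],
-- mutating index by index (ported as a foldl over the index range carrying the mutated line);
-- second nested loop collects board[r][c], skipping on any exception (pyGet? = none).
def board_line_add (raw : List (List (Option (Int × Int)))) (board : List (List Int)) : List (List Int) :=
  let raw2 := raw.map (fun line =>
    (List.range line.length).foldl
      (fun acc y => if acc.contains none then acc.set y none else acc) line)
  raw2.map (fun line =>
    line.foldl (fun acc cell =>
      match cell with
      | some p =>
        match PySem.List.pyGet? board p.1 with
        | some r =>
          match PySem.List.pyGet? r p.2 with
          | some v => acc ++ [v]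
          | none => acc
        | none => acc
      | none => acc) [])

def win_check_list (board : List (List Int)) (matrix_size : Int) (row : Int) (col : Int) : List (List Int) :=
  let index_change : List (List (Int × Int)) :=
    [[(0, 0), (0, 1), (0, 2), (0, 3), (0, 4)],
     [(0, 0), (-1, 1), (-2, 2), (-3, 3), (-4, 4)],
     [(0, 0), (1, 1), (2, 2), (3, 3), (4, 4)],
     [(0, 0), (1, 0), (2, 0), (3, 0), (4, 0)]]
  let mk : Nat → List (List (Option (Int × Int))) := fun n =>
    (List.range 4).map (fun i => (List.range n).map (fun y =>
      some (row + ((index_change.getD i []).getD y (0, 0)).1,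
            col + ((index_change.getD i []).getD y (0, 0)).2)))
  let raw_board_line : List (List (Option (Int × Int))) :=
    if matrix_size < 5 then mk 3
    else if 4 < matrix_size ∧ matrix_size < 8 then mk 4
    else if 7 < matrix_size then mk 5
    else [[], [], [], []]
  board_line_add (negative_check raw_board_line) board

-- ===== PORT B =====
-- cell(r, c): the board value at (r, c) if both indices are in range, else None
def pvCell (board : List (List Int)) (r c : Int) : Option Int :=
  if 0 ≤ r ∧ r < (board.length : Int) then
    match PySem.List.pyGet? board r with
    | some rw => if 0 ≤ c ∧ c < (rw.length : Int) then PySem.List.pyGet? rw c else none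
    | none => none
  else none

-- walk(r, c, dr, dc, k): emit the in-range cells met on a k-step walk along (dr, dc)
def pvWalk (board : List (List Int)) (dr dc : Int) : Int → Int → Nat → List Int
  | _, _, 0 => []
  | r, c, Nat.succ k =>
    (pvCell board r c).toList ++ pvWalk board dr dc (r + dr) (c + dc) k

def win_check_list_alt (board : List (List Int)) (matrix_size : Int) (row : Int) (col : Int) : List (List Int) :=
  let n : Nat := if matrix_size < 5 then 3 else if matrix_size < 8 then 4 else 5
  let line : Int → Int → List Int := fun dr dc =>
    let end_r := if dr < 0 then row + ((n : Int) - 1) * dr else row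
    let end_c := if dc < 0 then col + ((n : Int) - 1) * dc else col
    if end_r < 0 ∨ end_c < 0 then [] else pvWalk board dr dc row col n
  [line 0 1, line (-1) 1, line 1 1, line 1 0]

-- ===== PRECONDITION & SPEC =====
def Spec_win_check_list (board : List (List Int)) (matrix_size : Int) (row : Int) (col : Int) (out : List (List Int)) : Prop := out = win_check_list_alt board matrix_size row col
instance (board : List (List Int)) (matrix_size : Int) (row : Int) (col : Int) (out : List (List Int)) : Decidable (Spec_win_check_list board matrix_size row col out) := by unfold Spec_win_check_list; infer_instance

-- ===== CLAIM (what is proved, stated in full; the proofs are below) =====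
def Claim_equal_win_check_list : Prop := ∀ (board : List (List Int)) (matrix_size : Int) (row : Int) (col : Int), Dom_win_check_list board matrix_size row col → Spec_win_check_list board matrix_size row col (win_check_list board matrix_size row col)

-- ===== LEMMAS AND PROOFS =====

-- the per-line stages of board_line_add, named for the proofs
def pvWipe (line : List (Option (Int × Int))) : List (Option (Int × Int)) :=
  (List.range line.length).foldl
    (fun acc y => if acc.contains none then acc.set y none else acc) line

def pvAdd (board : List (List Int)) (line : List (Option (Int × Int))) : List Int :=
  line.foldl (fun acc cell =>
    match cell with
    | some p =>
      match PySem.List.pyGet? board p.1 with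
      | some r =>
        match PySem.List.pyGet? r p.2 with
        | some v => acc ++ [v]
        | none => acc
      | none => acc
    | none => acc) []

lemma board_line_add_eq (raw : List (List (Option (Int × Int)))) (board : List (List Int)) :
    board_line_add raw board = raw.map (fun line => pvAdd board (pvWipe line)) := by
  simp [board_line_add, pvAdd, pvWipe, List.map_map]

-- A's per-coordinate lookup
def pvGetA (board : List (List Int)) (p : Int × Int) : Option Int :=
  (PySem.List.pyGet? board p.1).bind (fun r => PySem.List.pyGet? r p.2)

lemma pvGet_eq (board : List (List Int)) (p : Int × Int) (h1 : 0 ≤ p.1) (h2 : 0 ≤ p.2) :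
    pvGetA board p = pvCell board p.1 p.2 := by
  unfold pvGetA pvCell
  rw [PySem.List.pyGet?_of_nonneg board h1]
  by_cases hl : p.1 < (board.length : Int)
  · have hlt : p.1.toNat < board.length := by omega
    rw [List.getElem?_eq_getElem hlt]
    simp only [h1, hl, and_true, if_true, Option.bind_some]
    by_cases hr : p.2 < ((board[p.1.toNat]'hlt).length : Int)
    · rw [if_pos ⟨h2, hr⟩]
    · rw [if_neg (by omega)]
      rw [PySem.List.pyGet?_of_nonneg (board[p.1.toNat]'hlt) h2]
      rw [List.getElem?_eq_none_iff]; omega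
  · have hn : board[p.1.toNat]? = none := by rw [List.getElem?_eq_none_iff]; omega
    simp [hl, hn]

lemma pvContains_set (l : List (Option (Int × Int))) (y : Nat) (h : l.contains none = true) :
    (l.set y none).contains none = true := by
  by_cases hy : y < l.length
  · have : none ∈ l.set y none := by
      have h2 : (l.set y none)[y]'(by simpa using hy) = none := List.getElem_set_self (by simpa using hy)
      exact List.mem_of_getElem h2
    simpa using this
  · rw [List.set_eq_of_length_le (by omega)]; exact h

lemma pvFoldl_set_cond (l : List Nat) (d : List (Option (Int × Int))) (h : d.contains none = true) :
    l.foldl (fun acc y => if acc.contains none then acc.set y none else acc) d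
      = l.foldl (fun acc y => acc.set y none) d := by
  induction l generalizing d with
  | nil => rfl
  | cons y t ih => simp only [List.foldl_cons, h, if_true]; exact ih _ (pvContains_set d y h)

lemma pvFoldl_map_succ (l : List Nat) (x : Option (Int × Int)) (t : List (Option (Int × Int))) :
    (l.map (· + 1)).foldl (fun acc y => acc.set y none) (x :: t)
      = x :: l.foldl (fun acc y => acc.set y none) t := by
  induction l generalizing t with
  | nil => rfl
  | cons y l ih => simp only [List.map_cons, List.foldl_cons, List.set_cons_succ]; exact ih _

lemma pvFoldl_set_all (d : List (Option (Int × Int))) :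
    (List.range d.length).foldl (fun acc y => acc.set y none) d = d.map (fun _ => none) := by
  induction d with
  | nil => rfl
  | cons a t ih =>
    simp only [List.length_cons, List.range_succ_eq_map, List.foldl_cons, List.set_cons_zero]
    rw [pvFoldl_map_succ]
    simp [ih]

lemma wipe_of_contains (line : List (Option (Int × Int))) (h : line.contains none = true) :
    pvWipe line = line.map (fun _ => none) := by
  unfold pvWipe
  rw [pvFoldl_set_cond _ _ h, pvFoldl_set_all]

lemma wipe_of_not_contains (line : List (Option (Int × Int))) (h : line.contains none = false) :
    pvWipe line = line := by
  unfold pvWipe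
  generalize List.range line.length = l
  induction l with
  | nil => rfl
  | cons y t ih => simp only [List.foldl_cons, h]; simpa using ih

lemma contains_map_cell (coords : List (Int × Int)) :
    ((coords.map (fun p => if p.1 < 0 ∨ p.2 < 0 then (none : Option (Int × Int)) else some p)).contains none)
      = coords.any (fun p => decide (p.1 < 0) || decide (p.2 < 0)) := by
  induction coords with
  | nil => rfl
  | cons p t ih =>
      by_cases h : p.1 < 0 ∨ p.2 < 0
      · simp [h]
      · have h1 : ¬ p.1 < 0 := fun hc => h (Or.inl hc)
        have h2 : ¬ p.2 < 0 := fun hc => h (Or.inr hc)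
        simp only [List.map_cons, List.contains_cons, ih, List.any_cons]
        simp [h1, h2]

lemma pvAdd_step (board : List (List Int)) (acc : List Int) (cell : Option (Int × Int)) :
    (match cell with
      | some p =>
        match PySem.List.pyGet? board p.1 with
        | some r =>
          match PySem.List.pyGet? r p.2 with
          | some v => acc ++ [v]
          | none => acc
        | none => acc
      | none => acc)
    = acc ++ ((cell.bind (pvGetA board ·)).toList) := by
  cases cell with
  | none => simp
  | some p =>
    simp only [Option.bind_some, pvGetA]
    cases h : PySem.List.pyGet? board p.1 with
    | none => simp
    | some r => cases h2 : PySem.List.pyGet? r p.2 <;> simp [h2]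

lemma pvAdd_gen (board : List (List Int)) (line : List (Option (Int × Int))) (acc : List Int) :
    line.foldl (fun acc cell =>
      match cell with
      | some p =>
        match PySem.List.pyGet? board p.1 with
        | some r =>
          match PySem.List.pyGet? r p.2 with
          | some v => acc ++ [v]
          | none => acc
        | none => acc
      | none => acc) acc = acc ++ line.filterMap (fun cell => cell.bind (pvGetA board ·)) := by
  induction line generalizing acc with
  | nil => simp
  | cons c t ih =>
    simp only [List.foldl_cons, List.filterMap_cons]
    rw [pvAdd_step, ih]
    cases h : c.bind (pvGetA board ·) <;> simp

lemma add_all_none (board : List (List Int)) (l : List (Option (Int × Int))) :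
    pvAdd board (l.map (fun _ => none)) = [] := by
  unfold pvAdd
  rw [pvAdd_gen]
  simp

lemma add_eq_filterMap (board : List (List Int)) (coords : List (Int × Int)) :
    pvAdd board (coords.map some) = coords.filterMap (pvGetA board) := by
  unfold pvAdd
  rw [pvAdd_gen]
  simp [List.filterMap_map]

lemma dir_eq (board : List (List Int)) (coords : List (Int × Int)) :
    pvAdd board (pvWipe (coords.map (fun p => if p.1 < 0 ∨ p.2 < 0 then none else some p)))
      = (if coords.any (fun p => decide (p.1 < 0) || decide (p.2 < 0)) then []
         else coords.filterMap (fun p => pvCell board p.1 p.2)) := by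
  by_cases h : coords.any (fun p => decide (p.1 < 0) || decide (p.2 < 0)) = true
  · rw [wipe_of_contains _ (by rw [contains_map_cell]; exact h)]
    rw [if_pos h]
    exact add_all_none board _
  · have h' := h
    rw [Bool.not_eq_true] at h'
    have hmem : ∀ p ∈ coords, ¬ p.1 < 0 ∧ ¬ p.2 < 0 := by
      intro p hp
      have := List.any_eq_false.mp h' p hp
      constructor <;> intro hc <;> simp [hc] at this
    rw [wipe_of_not_contains _ (by rw [contains_map_cell]; exact h')]
    have hmap : coords.map (fun p => if p.1 < 0 ∨ p.2 < 0 then (none : Option (Int × Int)) else some p)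
        = coords.map some := by
      refine List.map_congr_left (fun p hp => ?_)
      rcases hmem p hp with ⟨h1, h2⟩
      simp [h1, h2]
    rw [hmap, add_eq_filterMap, if_neg h]
    exact List.filterMap_congr (fun p hp =>
      pvGet_eq board p (by have := (hmem p hp).1; omega) (by have := (hmem p hp).2; omega))

-- the coordinates pvWalk visits, for relating B's walk to an explicit list
def pvSteps (dr dc : Int) : Int → Int → Nat → List (Int × Int)
  | _, _, 0 => []
  | r, c, Nat.succ k => (r, c) :: pvSteps dr dc (r + dr) (c + dc) k

lemma walk_eq_filterMap (board : List (List Int)) (dr dc r c : Int) (k : Nat) :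
    pvWalk board dr dc r c k = (pvSteps dr dc r c k).filterMap (fun p => pvCell board p.1 p.2) := by
  induction k generalizing r c with
  | zero => rfl
  | succ k ih =>
    simp only [pvWalk, pvSteps, List.filterMap_cons, ih]
    cases h : pvCell board r c <;> simp

-- ===== VERDICT (by name: the statement is the Claim_ definition above) =====
theorem win_check_list_spec : Claim_equal_win_check_list := by
  intro board ms row col _
  unfold Spec_win_check_list win_check_list win_check_list_alt
  by_cases h5 : ms < 5
  · simp only [if_pos h5]
    rw [board_line_add_eq]
    unfold negative_check
    simp only [List.map_map]
    norm_num [List.range_succ, List.getD, Function.comp]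
    simp only [walk_eq_filterMap]
    norm_num [pvSteps]
    refine ⟨?_, ?_, ?_, ?_⟩ <;>
      [ (convert dir_eq board [(row, col), (row, col + 1), (row, col + 2)] using 2);
        (convert dir_eq board [(row, col), (row + -1, col + 1), (row + -2, col + 2)] using 2);
        (convert dir_eq board [(row, col), (row + 1, col + 1), (row + 2, col + 2)] using 2);
        (convert dir_eq board [(row, col), (row + 1, col), (row + 2, col)] using 2) ] <;>
      first
        | (simp only [List.any_cons, List.any_nil, Bool.or_eq_true, decide_eq_true_eq, Bool.false_eq_true, or_false]; omega)
        | (exact congrArg _ (by norm_num; try omega))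
  · by_cases h8 : ms < 8
    · have hA : (4:Int) < ms ∧ ms < 8 := ⟨by omega, h8⟩
      simp only [if_neg h5, if_pos hA, if_pos h8]
      rw [board_line_add_eq]
      unfold negative_check
      simp only [List.map_map]
      norm_num [List.range_succ, List.getD, Function.comp]
      simp only [walk_eq_filterMap]
      norm_num [pvSteps]
      refine ⟨?_, ?_, ?_, ?_⟩ <;>
        [ (convert dir_eq board [(row, col), (row, col + 1), (row, col + 2), (row, col + 3)] using 2);
          (convert dir_eq board [(row, col), (row + -1, col + 1), (row + -2, col + 2), (row + -3, col + 3)] using 2);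
          (convert dir_eq board [(row, col), (row + 1, col + 1), (row + 2, col + 2), (row + 3, col + 3)] using 2);
          (convert dir_eq board [(row, col), (row + 1, col), (row + 2, col), (row + 3, col)] using 2) ] <;>
        first
          | (simp only [List.any_cons, List.any_nil, Bool.or_eq_true, decide_eq_true_eq, Bool.false_eq_true, or_false]; omega)
          | (exact congrArg _ (by norm_num; try omega))
    · have hA : ¬((4:Int) < ms ∧ ms < 8) := by omega
      have h7 : (7:Int) < ms := by omega
      simp only [if_neg h5, if_neg hA, if_pos h7, if_neg h8]
      rw [board_line_add_eq]
      unfold negative_check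
      simp only [List.map_map]
      norm_num [List.range_succ, List.getD, Function.comp]
      simp only [walk_eq_filterMap]
      norm_num [pvSteps]
      refine ⟨?_, ?_, ?_, ?_⟩ <;>
        [ (convert dir_eq board [(row, col), (row, col + 1), (row, col + 2), (row, col + 3), (row, col + 4)] using 2);
          (convert dir_eq board [(row, col), (row + -1, col + 1), (row + -2, col + 2), (row + -3, col + 3), (row + -4, col + 4)] using 2);
          (convert dir_eq board [(row, col), (row + 1, col + 1), (row + 2, col + 2), (row + 3, col + 3), (row + 4, col + 4)] using 2);
          (convert dir_eq board [(row, col), (row + 1, col), (row + 2, col), (row + 3, col), (row + 4, col)] using 2) ] <;>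
        first
          | (simp only [List.any_cons, List.any_nil, Bool.or_eq_true, decide_eq_true_eq, Bool.false_eq_true, or_false]; omega)
          | (exact congrArg _ (by norm_num; try omega))
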